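-- pv_equiv track=rewrite | github.com/feimengfatcat/eclipse-workspace | 001_Three-digits/Three-digits/Three-digits.py | Three_digits
-- ===== SOURCE A (Python) =====
-- def Three_digits(digits):
--     if len(digits) < 3:
--         return 0,[]
--     list = []
--     for i in digits:
--         digits1= [b for b in digits if b != i]
--         for j in digits1:
--             digits2 = [p for p in digits1 if p != j]
--             for k in digits2:
--                 if i*100+j*10+k not in list:
--                     list.append(i*100+j*10+k)
--     return len(list),list
-- ===== SOURCE B (Python) =====
-- def Three_digits(digits):
--     if len(digits) < 3:
--         return 0, []
--     unique = []
--     for d in digits: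
--         if d not in unique:
--             unique.append(d)
--     result = []
--     for ai, i in enumerate(unique):
--         for bi, j in enumerate(unique):
--             if bi == ai:
--                 continue
--             for ci, k in enumerate(unique):
--                 if ci == ai or ci == bi:
--                     continue
--                 n = i * 100 + j * 10 + k
--                 if n not in result:
--                     result.append(n)
--     return len(result), result
-- ===== Notes on version B (the rewrite author's own statement) =====
-- stated objective: alternative
-- what changed: B builds the distinct-value list once and runs one triple pass over it with index-based distinctness (enumerate), with a single result-level dedup, instead of A's per-iteration rebuilding of filtered lists digits1/digits2 over the full (possibly duplicate-heavy) input.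
import Mathlib
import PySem

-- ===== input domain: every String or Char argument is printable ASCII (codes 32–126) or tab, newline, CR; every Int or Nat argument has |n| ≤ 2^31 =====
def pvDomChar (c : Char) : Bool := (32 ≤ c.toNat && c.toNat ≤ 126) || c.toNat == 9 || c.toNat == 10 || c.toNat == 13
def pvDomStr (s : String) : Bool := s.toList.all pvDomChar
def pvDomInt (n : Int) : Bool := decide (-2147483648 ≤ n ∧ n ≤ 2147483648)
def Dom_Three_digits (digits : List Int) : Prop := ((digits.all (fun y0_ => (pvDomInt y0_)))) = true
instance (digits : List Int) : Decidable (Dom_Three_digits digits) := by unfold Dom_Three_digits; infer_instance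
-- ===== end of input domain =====

-- B builds the distinct-value list once and makes one triple pass over it with index-based
-- distinctness, instead of A's per-iteration rebuilding of value-filtered lists over the full input.

-- ===== PORT A =====
def Three_digits (digits : List Int) : Int × List Int :=
  if digits.length < 3 then (0, [])
  else
    let l := digits.foldl (fun acc i =>
      let digits1 := digits.filter (fun b => b != i)
      digits1.foldl (fun acc j =>
        let digits2 := digits1.filter (fun p => p != j)
        digits2.foldl (fun acc k =>
          if i * 100 + j * 10 + k ∈ acc then acc else acc ++ [i * 100 + j * 10 + k]) acc) acc) []
    ((l.length : Int), l)

-- ===== PORT B =====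
def Three_digits_alt (digits : List Int) : Int × List Int :=
  if digits.length < 3 then (0, [])
  else
    let unique := digits.foldl (fun u d => if d ∈ u then u else u ++ [d]) []
    let result := (PySem.List.enumerate unique).foldl (fun acc a =>
      (PySem.List.enumerate unique).foldl (fun acc b =>
        if b.1 == a.1 then acc
        else
          (PySem.List.enumerate unique).foldl (fun acc c =>
            if c.1 == a.1 || c.1 == b.1 then acc
            else
              if a.2 * 100 + b.2 * 10 + c.2 ∈ acc then acc
              else acc ++ [a.2 * 100 + b.2 * 10 + c.2]) acc) acc) []
    ((result.length : Int), result)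

-- ===== PRECONDITION & SPEC =====
def Spec_Three_digits (digits : List Int) (out : Int × List Int) : Prop := out = Three_digits_alt digits
instance (digits : List Int) (out : Int × List Int) : Decidable (Spec_Three_digits digits out) := by unfold Spec_Three_digits; infer_instance

-- ===== CLAIM (what is proved, stated in full; the proofs are below) =====
def Claim_equal_Three_digits : Prop := ∀ (digits : List Int), Dom_Three_digits digits → Spec_Three_digits digits (Three_digits digits)

-- ===== LEMMAS AND PROOFS =====

-- "if x not in out: out.append(x)" as a fold step
def pvIns (acc : List Int) (n : Int) : List Int := if n ∈ acc then acc else acc ++ [n]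

-- first-occurrence dedup, phrased by repeated value-filtering (the shape of A's digits1/digits2)
def pvFd : List Int → List Int
  | [] => []
  | x :: xs => x :: pvFd (xs.filter (fun b => b != x))
termination_by l => l.length
decreasing_by simpa using Nat.lt_succ_of_le (List.length_filter_le _ _)

lemma mem_foldl_pvIns (s : List Int) (acc : List Int) (x : Int) :
    x ∈ s.foldl pvIns acc ↔ x ∈ acc ∨ x ∈ s := by
  induction s generalizing acc with
  | nil => simp
  | cons a s ih =>
    rw [List.foldl_cons, ih]
    unfold pvIns
    by_cases h : a ∈ acc
    · simp only [if_pos h, List.mem_cons]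
      constructor
      · tauto
      · rintro (h1 | rfl | h2) <;> tauto
    · simp only [if_neg h, List.mem_append, List.mem_cons]
      tauto

lemma foldl_pvIns_of_subset {s acc : List Int} (h : ∀ y ∈ s, y ∈ acc) :
    s.foldl pvIns acc = acc := by
  induction s with
  | nil => rfl
  | cons a s ih =>
    rw [List.foldl_cons]
    have ha : pvIns acc a = acc := by simp [pvIns, h a (List.mem_cons_self ..)]
    rw [ha]
    exact ih fun y hy => h y (List.mem_cons_of_mem _ hy)

-- the crux: dedup-folding a flatMap only depends on the first occurrences of the outer elements
lemma foldl_pvIns_flatMap_fd (g : Int → List Int) :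
    ∀ (xs S acc : List Int), (∀ x ∈ S, ∀ y ∈ g x, y ∈ acc) →
      (xs.flatMap g).foldl pvIns acc
        = ((pvFd (xs.filter (fun x => decide (x ∉ S)))).flatMap g).foldl pvIns acc := by
  intro xs
  induction xs with
  | nil => intro S acc _; simp [pvFd]
  | cons x xs ih =>
    intro S acc h
    by_cases hx : x ∈ S
    · rw [List.flatMap_cons, List.foldl_append, foldl_pvIns_of_subset (h x hx),
        List.filter_cons_of_neg (by simp [hx])]
      exact ih S acc h
    · rw [List.filter_cons_of_pos (by simp [hx])]
      rw [pvFd]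
      rw [List.flatMap_cons, List.flatMap_cons, List.foldl_append, List.foldl_append]
      have hff : (List.filter (fun b => b != x) (xs.filter (fun y => decide (y ∉ S))))
          = xs.filter (fun y => decide (y ∉ x :: S)) := by
        rw [List.filter_filter]
        apply List.filter_congr
        intro y _
        by_cases h1 : y = x <;> by_cases h2 : y ∈ S <;> simp [h1, h2]
      rw [hff]
      apply ih (x :: S)
      intro x' hx' y hy
      rcases List.mem_cons.mp hx' with rfl | hS
      · exact (mem_foldl_pvIns _ _ _).mpr (Or.inr hy)
      · exact (mem_foldl_pvIns _ _ _).mpr (Or.inl (h x' hS y hy))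

lemma foldl_pvIns_flatMap_fd' (g : Int → List Int) (xs acc : List Int) :
    (xs.flatMap g).foldl pvIns acc = ((pvFd xs).flatMap g).foldl pvIns acc := by
  have := foldl_pvIns_flatMap_fd g xs [] acc (by simp)
  simpa using this

lemma foldl_pvIns_map_fd (f : Int → Int) (xs acc : List Int) :
    (xs.map f).foldl pvIns acc = ((pvFd xs).map f).foldl pvIns acc := by
  rw [List.map_eq_flatMap, List.map_eq_flatMap]
  exact foldl_pvIns_flatMap_fd' _ xs acc

lemma pvFd_filter (p : Int → Bool) (l : List Int) : pvFd (l.filter p) = (pvFd l).filter p := by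
  suffices h : ∀ (n : Nat) (l : List Int), l.length ≤ n → pvFd (l.filter p) = (pvFd l).filter p from
    h l.length l le_rfl
  intro n
  induction n with
  | zero =>
    intro l hl
    cases l with
    | nil => simp [pvFd]
    | cons x xs => simp at hl
  | succ n ih =>
    intro l hl
    cases l with
    | nil => simp [pvFd]
    | cons x xs =>
      have hxs : xs.length ≤ n := by simpa using hl
      by_cases hp : p x
      · rw [List.filter_cons_of_pos hp, pvFd, pvFd, List.filter_cons_of_pos hp]
        have comm : (xs.filter p).filter (fun b => b != x) = (xs.filter (fun b => b != x)).filter p := by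
          rw [List.filter_filter, List.filter_filter]
          exact List.filter_congr fun y _ => Bool.and_comm _ _
        rw [comm, ih _ ((List.length_filter_le _ xs).trans hxs)]
      · rw [List.filter_cons_of_neg hp, pvFd, List.filter_cons_of_neg hp]
        have hid : (xs.filter (fun b => b != x)).filter p = xs.filter p := by
          rw [List.filter_filter]
          apply List.filter_congr
          intro y _
          by_cases hyx : y = x
          · subst hyx; simp [hp]
          · simp [hyx]
        rw [← ih _ ((List.length_filter_le _ xs).trans hxs), hid]

lemma mem_pvFd {l : List Int} {y : Int} (h : y ∈ pvFd l) : y ∈ l := by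
  revert h
  suffices hs : ∀ (n : Nat) (l : List Int), l.length ≤ n → y ∈ pvFd l → y ∈ l from hs l.length l le_rfl
  intro n
  induction n with
  | zero =>
    intro l hl
    cases l with
    | nil => intro hy; simp [pvFd] at hy
    | cons x xs => simp at hl
  | succ n ih =>
    intro l hl
    cases l with
    | nil => intro hy; simp [pvFd] at hy
    | cons x xs =>
      have hxs : xs.length ≤ n := by simp at hl; omega
      intro hy
      rw [pvFd] at hy
      rcases List.mem_cons.mp hy with rfl | hy'
      · exact List.mem_cons_self ..
      · exact List.mem_cons_of_mem _ (List.mem_of_mem_filter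
          (ih _ ((List.length_filter_le _ xs).trans hxs) hy'))

lemma pvFd_nodup (l : List Int) : (pvFd l).Nodup := by
  suffices hs : ∀ (n : Nat) (l : List Int), l.length ≤ n → (pvFd l).Nodup from hs l.length l le_rfl
  intro n
  induction n with
  | zero =>
    intro l hl
    cases l with
    | nil => simp [pvFd]
    | cons x xs => simp at hl
  | succ n ih =>
    intro l hl
    cases l with
    | nil => simp [pvFd]
    | cons x xs =>
      have hxs : xs.length ≤ n := by simpa using hl
      rw [pvFd]
      refine List.nodup_cons.mpr ⟨fun hx => ?_, ih _ ((List.length_filter_le _ xs).trans hxs)⟩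
      have := List.of_mem_filter (mem_pvFd hx)
      simp at this

lemma foldl_pvIns_eq_append_pvFd : ∀ (s acc : List Int),
    s.foldl pvIns acc = acc ++ pvFd (s.filter (fun y => decide (y ∉ acc))) := by
  intro s
  induction s with
  | nil => intro acc; simp [pvFd]
  | cons x xs ih =>
    intro acc
    rw [List.foldl_cons]
    by_cases hx : x ∈ acc
    · have : pvIns acc x = acc := by simp [pvIns, hx]
      rw [this, ih, List.filter_cons_of_neg (by simp [hx])]
    · have : pvIns acc x = acc ++ [x] := by simp [pvIns, hx]
      rw [this, ih, List.filter_cons_of_pos (by simp [hx]), pvFd]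
      have hff : (xs.filter (fun y => decide (y ∉ acc))).filter (fun b => b != x)
          = xs.filter (fun y => decide (y ∉ acc ++ [x])) := by
        rw [List.filter_filter]
        apply List.filter_congr
        intro y _
        by_cases h1 : y = x <;> by_cases h2 : y ∈ acc <;> simp [h1, h2]
      rw [hff, List.append_assoc]
      rfl

lemma uniq_eq_pvFd (s : List Int) : s.foldl pvIns [] = pvFd s := by
  have := foldl_pvIns_eq_append_pvFd s []
  simpa using this

-- loop-shape conversions
lemma foldl_skip {β : Type} (p : β → Bool) (f : List Int → β → List Int) (l : List β) :
    ∀ acc, l.foldl (fun a x => if p x then a else f a x) acc = (l.filter (fun x => !p x)).foldl f acc := by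
  induction l with
  | nil => intro acc; rfl
  | cons x xs ih =>
    intro acc
    rw [List.foldl_cons, List.filter_cons]
    cases hp : p x <;> simp [ih]

lemma foldl_foldl_flatMap {β : Type} (g : β → List Int) (l : List β) :
    ∀ acc, l.foldl (fun acc x => (g x).foldl pvIns acc) acc = (l.flatMap g).foldl pvIns acc := by
  induction l with
  | nil => intro acc; rfl
  | cons x xs ih => intro acc; rw [List.foldl_cons, List.flatMap_cons, List.foldl_append, ih]

lemma foldl_pvIns_flatMap_congr {β : Type} (l : List β) (g g' : β → List Int)
    (h : ∀ x ∈ l, ∀ acc, (g x).foldl pvIns acc = (g' x).foldl pvIns acc) :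
    ∀ acc, (l.flatMap g).foldl pvIns acc = (l.flatMap g').foldl pvIns acc := by
  induction l with
  | nil => intro acc; rfl
  | cons x xs ih =>
    intro acc
    rw [List.flatMap_cons, List.flatMap_cons, List.foldl_append, List.foldl_append,
      h x (List.mem_cons_self ..) acc]
    exact ih (fun x hx => h x (List.mem_cons_of_mem _ hx)) _

-- value-form candidate sequences
def pvCandA (l : List Int) : List Int :=
  l.flatMap (fun i => (l.filter (fun b => b != i)).flatMap (fun j =>
    ((l.filter (fun b => b != i)).filter (fun p => p != j)).map (fun k => i * 100 + j * 10 + k)))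

def pvCandB (u : List Int) : List Int :=
  (PySem.List.enumerate u).flatMap (fun a =>
    ((PySem.List.enumerate u).filter (fun b => !(b.1 == a.1))).flatMap (fun b =>
      ((PySem.List.enumerate u).filter (fun c => !(c.1 == a.1 || c.1 == b.1))).map
        (fun c => a.2 * 100 + b.2 * 10 + c.2)))

-- A's dedup fold over its candidates equals the same fold over the candidates of u := pvFd l
lemma candA_fold_eq (l : List Int) (acc : List Int) :
    (pvCandA l).foldl pvIns acc = (pvCandA (pvFd l)).foldl pvIns acc := by
  unfold pvCandA
  rw [foldl_pvIns_flatMap_fd']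
  apply foldl_pvIns_flatMap_congr
  intro i _ acc
  rw [foldl_pvIns_flatMap_fd' _ (l.filter (fun b => b != i)), pvFd_filter]
  apply foldl_pvIns_flatMap_congr
  intro j _ acc
  rw [foldl_pvIns_map_fd, pvFd_filter, pvFd_filter]

-- index-based distinctness over a Nodup list is value-based distinctness
lemma enum_fst_eq_iff {u : List Int} (hnd : u.Nodup) {a : Int × Int}
    (ha : a ∈ PySem.List.enumerate u) {e : Int × Int} (he : e ∈ PySem.List.enumerate u) :
    (e.1 == a.1) = (e.2 == a.2) := by
  rw [PySem.List.mem_enumerate_iff] at ha he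
  obtain ⟨ka, hka, rfl⟩ := ha
  obtain ⟨ke, hke, rfl⟩ := he
  apply Bool.eq_iff_iff.mpr
  simp only [beq_iff_eq, hnd.getElem_inj_iff]
  omega

lemma map_snd_filter_snd (p : Int → Bool) (u : List Int) :
    (((PySem.List.enumerate u).filter (fun e => p e.2)).map (fun e => e.2)) = u.filter p := by
  conv_rhs => rw [← PySem.List.map_snd_enumerate u 0, List.filter_map]
  rfl

lemma map_snd_filter_map (p : Int → Bool) (f : Int → Int) (u : List Int) :
    ((PySem.List.enumerate u).filter (fun e => p e.2)).map (fun e => f e.2) = (u.filter p).map f := by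
  rw [← map_snd_filter_snd p u, List.map_map]
  rfl

lemma flatMap_snd_filter (p : Int → Bool) (G : Int → List Int) (u : List Int) :
    ((PySem.List.enumerate u).filter (fun e => p e.2)).flatMap (fun e => G e.2) = (u.filter p).flatMap G := by
  rw [← map_snd_filter_snd p u, List.flatMap_map]

lemma flatMap_snd (G : Int → List Int) (u : List Int) :
    (PySem.List.enumerate u).flatMap (fun e => G e.2) = u.flatMap G := by
  conv_rhs => rw [← PySem.List.map_snd_enumerate u 0]
  rw [List.flatMap_map]

lemma candB_eq_candA_of_nodup (u : List Int) (hnd : u.Nodup) : pvCandB u = pvCandA u := by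
  unfold pvCandB pvCandA
  refine Eq.trans (List.flatMap_congr (g := fun a : Int × Int =>
      ((PySem.List.enumerate u).filter (fun b => !(b.2 == a.2))).flatMap (fun b =>
        (u.filter (fun v => !(v == a.2 || v == b.2))).map (fun v => a.2 * 100 + b.2 * 10 + v))) ?_) ?_
  · -- replace index tests by value tests, then drop indices in the innermost map
    intro a ha
    rw [List.filter_congr (q := fun b => !(b.2 == a.2)) (fun b hb => by rw [enum_fst_eq_iff hnd ha hb])]
    apply List.flatMap_congr
    intro b hb
    have hb' : b ∈ PySem.List.enumerate u := List.mem_of_mem_filter hb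
    rw [List.filter_congr (q := fun c => !(c.2 == a.2 || c.2 == b.2))
      (fun c hc => by rw [enum_fst_eq_iff hnd ha hc, enum_fst_eq_iff hnd hb' hc])]
    exact map_snd_filter_map (fun v => !(v == a.2 || v == b.2)) (fun v => a.2 * 100 + b.2 * 10 + v) u
  · -- drop the remaining index pairs level by level, then normalise the boolean filters
    refine Eq.trans (List.flatMap_congr (g := fun a : Int × Int =>
      (u.filter (fun v => !(v == a.2))).flatMap (fun j =>
        (u.filter (fun v => !(v == a.2 || v == j))).map (fun v => a.2 * 100 + j * 10 + v))) ?_) ?_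
    · intro a _
      exact flatMap_snd_filter (fun v => !(v == a.2))
        (fun j => (u.filter (fun v => !(v == a.2 || v == j))).map (fun v => a.2 * 100 + j * 10 + v)) u
    · refine Eq.trans (flatMap_snd (fun i => (u.filter (fun v => !(v == i))).flatMap (fun j =>
        (u.filter (fun v => !(v == i || v == j))).map (fun v => i * 100 + j * 10 + v))) u) ?_
      apply List.flatMap_congr
      intro i _
      have hfilt : u.filter (fun v => !(v == i)) = u.filter (fun b => b != i) :=
        List.filter_congr fun v _ => rfl
      rw [hfilt]
      apply List.flatMap_congr
      intro j _
      congr 1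
      rw [List.filter_filter]
      apply List.filter_congr
      intro v _
      cases hvi : v == i <;> cases hvj : v == j <;> simp [bne, hvi, hvj]

-- reshaping the two ports' loop nests into dedup folds over candidate sequences
lemma A_loop_eq (digits : List Int) :
    (digits.foldl (fun acc i =>
      let digits1 := digits.filter (fun b => b != i)
      digits1.foldl (fun acc j =>
        let digits2 := digits1.filter (fun p => p != j)
        digits2.foldl (fun acc k =>
          if i * 100 + j * 10 + k ∈ acc then acc else acc ++ [i * 100 + j * 10 + k]) acc) acc) [])
    = (pvCandA digits).foldl pvIns [] := by
  unfold pvCandA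
  rw [← foldl_foldl_flatMap]
  apply List.foldl_ext
  intro acc i _hi
  rw [← foldl_foldl_flatMap]
  apply List.foldl_ext
  intro acc j _hj
  rw [List.foldl_map]
  rfl

lemma B_loop_eq (u : List Int) :
    ((PySem.List.enumerate u).foldl (fun acc a =>
      (PySem.List.enumerate u).foldl (fun acc b =>
        if b.1 == a.1 then acc
        else
          (PySem.List.enumerate u).foldl (fun acc c =>
            if c.1 == a.1 || c.1 == b.1 then acc
            else
              if a.2 * 100 + b.2 * 10 + c.2 ∈ acc then acc
              else acc ++ [a.2 * 100 + b.2 * 10 + c.2]) acc) acc) [])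
    = (pvCandB u).foldl pvIns [] := by
  unfold pvCandB
  rw [← foldl_foldl_flatMap]
  apply List.foldl_ext
  intro acc a _
  rw [foldl_skip, ← foldl_foldl_flatMap]
  apply List.foldl_ext
  intro acc b _
  rw [foldl_skip, List.foldl_map]
  rfl

-- ===== VERDICT (by name: the statement is the Claim_ definition above) =====
theorem Three_digits_spec : Claim_equal_Three_digits := by
  intro digits _
  unfold Spec_Three_digits Three_digits Three_digits_alt
  by_cases hlen : digits.length < 3
  · simp [hlen]
  · simp only [if_neg hlen]
    have hu : digits.foldl (fun u d => if d ∈ u then u else u ++ [d]) [] = pvFd digits :=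
      uniq_eq_pvFd digits
    have hB : ((PySem.List.enumerate (pvFd digits)).foldl _ []) = (pvCandB (pvFd digits)).foldl pvIns [] :=
      B_loop_eq (pvFd digits)
    have hlists :
        (digits.foldl (fun acc i =>
          let digits1 := digits.filter (fun b => b != i)
          digits1.foldl (fun acc j =>
            let digits2 := digits1.filter (fun p => p != j)
            digits2.foldl (fun acc k =>
              if i * 100 + j * 10 + k ∈ acc then acc else acc ++ [i * 100 + j * 10 + k]) acc) acc) [])
        = ((PySem.List.enumerate (pvFd digits)).foldl (fun acc a =>
            (PySem.List.enumerate (pvFd digits)).foldl (fun acc b =>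
              if b.1 == a.1 then acc
              else
                (PySem.List.enumerate (pvFd digits)).foldl (fun acc c =>
                  if c.1 == a.1 || c.1 == b.1 then acc
                  else
                    if a.2 * 100 + b.2 * 10 + c.2 ∈ acc then acc
                    else acc ++ [a.2 * 100 + b.2 * 10 + c.2]) acc) acc) []) := by
      rw [A_loop_eq, B_loop_eq, candB_eq_candA_of_nodup _ (pvFd_nodup digits), candA_fold_eq]
    rw [hu]
    rw [hlists]
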